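-- pv_equiv track=rewrite | github.com/mortyc126-debug/SHA | p39_b3_deep_analysis.py | wang_cascade
-- ===== SOURCE A (Python) =====
-- MASK = 0xFFFFFFFF
--
-- def rotr(x, n): return ((x >> n) | (x << (32-n))) & MASK
--
-- def sig0(x):  return rotr(x,7)  ^ rotr(x,18) ^ (x>>3)
--
-- def sig1(x):  return rotr(x,17) ^ rotr(x,19) ^ (x>>10)
--
-- def Sig0(x):  return rotr(x,2)  ^ rotr(x,13) ^ rotr(x,22)
--
-- def Sig1(x):  return rotr(x,6)  ^ rotr(x,11) ^ rotr(x,25)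
--
-- def Ch(e,f,g):  return ((e&f) ^ (~e&g)) & MASK
--
-- def Maj(a,b,c): return (a&b) ^ (a&c) ^ (b&c)
--
-- K = [0x428a2f98,0x71374491,0xb5c0fbcf,0xe9b5dba5,0x3956c25b,0x59f111f1,0x923f82a4,0xab1c5ed5,
--      0xd807aa98,0x12835b01,0x243185be,0x550c7dc3,0x72be5d74,0x80deb1fe,0x9bdc06a7,0xc19bf174,
--      0xe49b69c1,0xefbe4786,0x0fc19dc6,0x240ca1cc,0x2de92c6f,0x4a7484aa,0x5cb0a9dc,0x76f988da,
--      0x983e5152,0xa831c66d,0xb00327c8,0xbf597fc7,0xc6e00bf3,0xd5a79147,0x06ca6351,0x14292967,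
--      0x27b70a85,0x2e1b2138,0x4d2c6dfc,0x53380d13,0x650a7354,0x766a0abb,0x81c2c92e,0x92722c85,
--      0xa2bfe8a1,0xa81a664b,0xc24b8b70,0xc76c51a3,0xd192e819,0xd6990624,0xf40e3585,0x106aa070,
--      0x19a4c116,0x1e376c08,0x2748774c,0x34b0bcb5,0x391c0cb3,0x4ed8aa4a,0x5b9cca4f,0x682e6ff3,
--      0x748f82ee,0x78a5636f,0x84c87814,0x8cc70208,0x90befffa,0xa4506ceb,0xbef9a3f7,0xc67178f2]
--
-- IV = [0x6a09e667,0xbb67ae85,0x3c6ef372,0xa54ff53a,0x510e527f,0x9b05688c,0x1f83d9ab,0x5be0cd19]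
--
-- def make_schedule(W16):
--     W = list(W16) + [0]*48
--     for i in range(16, 64):
--         W[i] = (sig1(W[i-2]) + W[i-7] + sig0(W[i-15]) + W[i-16]) & MASK
--     return W
--
-- def sha_rounds(W, R):
--     a,b,c,d,e,f,g,h = IV
--     states = [[a,b,c,d,e,f,g,h]]
--     for r in range(R):
--         T1 = (h + Sig1(e) + Ch(e,f,g) + K[r] + W[r]) & MASK
--         T2 = (Sig0(a) + Maj(a,b,c)) & MASK
--         h=g; g=f; f=e; e=(d+T1)&MASK
--         d=c; c=b; b=a; a=(T1+T2)&MASK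
--         states.append([a,b,c,d,e,f,g,h])
--     return states
--
-- def wang_cascade(W0, W1, DW0=1):
--     """Wang каскад: ΔW[i] обнуляет De_{i+1} для i=2..15 → De3..De16=0"""
--     Wn = [W0, W1] + [0]*14
--     DWs = [0]*16; DWs[0] = DW0
--     # i=2 → De3=0
--     Wft = [(Wn[i]+DWs[i])&MASK for i in range(16)]
--     sn3 = sha_rounds(make_schedule(Wn), 3)
--     sf3 = sha_rounds(make_schedule(Wft), 3)
--     DWs[2] = (-(sf3[3][4] - sn3[3][4])) & MASK
--     # i=3..15 → De4..De16=0
--     for step in range(13):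
--         wi = step+3; dt = step+4
--         Wfc = [(Wn[i]+DWs[i])&MASK for i in range(16)]
--         sn = sha_rounds(make_schedule(Wn), dt)
--         sf = sha_rounds(make_schedule(Wfc), dt)
--         DWs[wi] = (-(sf[dt][4] - sn[dt][4])) & MASK
--     Wf = [(Wn[i]+DWs[i])&MASK for i in range(16)]
--     sn = sha_rounds(make_schedule(Wn), 20)
--     sf = sha_rounds(make_schedule(Wf), 20)
--     return DWs, sn, sf
-- ===== SOURCE B (Python) =====
-- MASK = 0xFFFFFFFF
--
-- def rotr(x, n): return ((x >> n) | (x << (32-n))) & MASK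
--
-- def sig0(x):  return rotr(x,7)  ^ rotr(x,18) ^ (x>>3)
--
-- def sig1(x):  return rotr(x,17) ^ rotr(x,19) ^ (x>>10)
--
-- def Sig0(x):  return rotr(x,2)  ^ rotr(x,13) ^ rotr(x,22)
--
-- def Sig1(x):  return rotr(x,6)  ^ rotr(x,11) ^ rotr(x,25)
--
-- def Ch(e,f,g):  return ((e&f) ^ (~e&g)) & MASK
--
-- def Maj(a,b,c): return (a&b) ^ (a&c) ^ (b&c)
--
-- K = [0x428a2f98,0x71374491,0xb5c0fbcf,0xe9b5dba5,0x3956c25b,0x59f111f1,0x923f82a4,0xab1c5ed5,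
--      0xd807aa98,0x12835b01,0x243185be,0x550c7dc3,0x72be5d74,0x80deb1fe,0x9bdc06a7,0xc19bf174,
--      0xe49b69c1,0xefbe4786,0x0fc19dc6,0x240ca1cc,0x2de92c6f,0x4a7484aa,0x5cb0a9dc,0x76f988da,
--      0x983e5152,0xa831c66d,0xb00327c8,0xbf597fc7,0xc6e00bf3,0xd5a79147,0x06ca6351,0x14292967,
--      0x27b70a85,0x2e1b2138,0x4d2c6dfc,0x53380d13,0x650a7354,0x766a0abb,0x81c2c92e,0x92722c85,
--      0xa2bfe8a1,0xa81a664b,0xc24b8b70,0xc76c51a3,0xd192e819,0xd6990624,0xf40e3585,0x106aa070,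
--      0x19a4c116,0x1e376c08,0x2748774c,0x34b0bcb5,0x391c0cb3,0x4ed8aa4a,0x5b9cca4f,0x682e6ff3,
--      0x748f82ee,0x78a5636f,0x84c87814,0x8cc70208,0x90befffa,0xa4506ceb,0xbef9a3f7,0xc67178f2]
--
-- IV = [0x6a09e667,0xbb67ae85,0x3c6ef372,0xa54ff53a,0x510e527f,0x9b05688c,0x1f83d9ab,0x5be0cd19]
--
--
-- def schedule(W16):
--     # grow the schedule by appending (A preallocates 64 slots and assigns)
--     W = list(W16)
--     for i in range(16, 64):
--         W.append((sig1(W[i-2]) + W[i-7] + sig0(W[i-15]) + W[i-16]) & MASK)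
--     return W
--
--
-- def compress(st, w, k):
--     # one SHA-256 round as a pure function on an 8-tuple
--     a, b, c, d, e, f, g, h = st
--     T1 = (h + Sig1(e) + Ch(e, f, g) + k + w) & MASK
--     T2 = (Sig0(a) + Maj(a, b, c)) & MASK
--     return ((T1 + T2) & MASK, a, b, c, (d + T1) & MASK, e, f, g)
--
--
-- def trace(W, R):
--     # all intermediate states, driven by zip instead of indexing
--     st = tuple(IV)
--     states = [list(st)]
--     for w, k in zip(W[:R], K):
--         st = compress(st, w, k)
--         states.append(list(st))
--     return states
--
--
-- def e_after(W, R):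
--     # only the e register after R rounds (no state list built)
--     st = tuple(IV)
--     for w, k in zip(W[:R], K):
--         st = compress(st, w, k)
--     return st[4]
--
--
-- def wang_cascade(W0, W1, DW0=1):
--     """Wang cascade: one natural-side trace computed up front and sliced; a single
--     loop wi=2..15 (no peeled step) that only tracks the faulty e register and
--     patches the faulty message in place."""
--     Wn = [W0, W1] + [0]*14
--     DWs = [DW0] + [0]*15
--     sn = trace(schedule(Wn), 20)
--     Wf = [(w + d) & MASK for w, d in zip(Wn, DWs)]
--     for wi in range(2, 16):
--         dt = wi + 1
--         DWs[wi] = (sn[dt][4] - e_after(schedule(Wf), dt)) & MASK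
--         Wf[wi] = (Wn[wi] + DWs[wi]) & MASK
--     return DWs, sn, trace(schedule(Wf), 20)
-- ===== Notes on version B (the rewrite author's own statement) =====
-- stated objective: faster
-- what changed: B hoists the natural-side computation: one 20-round trace is computed up front and sliced, where A reruns sha_rounds(make_schedule(Wn), dt) in every cascade step; the peeled i=2 step and the 13-step loop become one loop wi=2..15 that patches the faulty message in place; rounds are driven by zip(W[:R], K) through a pure one-round function instead of index-driven accumulation, the cascade steps track only the faulty e register (no state list is built), and the schedule is grown by appending instead of preallocate-and-assign.
import Mathlib
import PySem

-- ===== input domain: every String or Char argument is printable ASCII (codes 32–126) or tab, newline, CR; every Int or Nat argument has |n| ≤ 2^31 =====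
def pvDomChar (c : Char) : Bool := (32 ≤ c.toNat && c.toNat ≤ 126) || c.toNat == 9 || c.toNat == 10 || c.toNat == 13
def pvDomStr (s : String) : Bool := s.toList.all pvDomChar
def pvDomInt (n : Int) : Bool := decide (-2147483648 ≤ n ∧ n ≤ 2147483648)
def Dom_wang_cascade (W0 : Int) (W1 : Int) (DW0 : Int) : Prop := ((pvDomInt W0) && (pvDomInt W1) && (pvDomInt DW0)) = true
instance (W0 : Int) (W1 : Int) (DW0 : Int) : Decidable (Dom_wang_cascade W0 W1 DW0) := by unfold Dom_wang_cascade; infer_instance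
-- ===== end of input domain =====

-- B computes the natural-side trace once and slices it, runs one zip-driven round
-- function instead of A's index-driven sha_rounds, grows the schedule by appending
-- instead of preallocate-and-assign, and in the cascade loop only tracks the faulty
-- e register (no state list), patching the faulty message in place.

-- ===== PORT A =====
-- shared module helpers (identical in Source A and Source B)
def pvMASK : Int := 0xFFFFFFFF

def rotr (x : Int) (n : Nat) : Int :=
  PySem.Int.band (PySem.Int.bor (x >>> n) (x <<< (32 - n))) pvMASK

def sig0 (x : Int) : Int := PySem.Int.bxor (PySem.Int.bxor (rotr x 7) (rotr x 18)) (x >>> 3)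
def sig1 (x : Int) : Int := PySem.Int.bxor (PySem.Int.bxor (rotr x 17) (rotr x 19)) (x >>> 10)
def bigSig0 (x : Int) : Int := PySem.Int.bxor (PySem.Int.bxor (rotr x 2) (rotr x 13)) (rotr x 22)
def bigSig1 (x : Int) : Int := PySem.Int.bxor (PySem.Int.bxor (rotr x 6) (rotr x 11)) (rotr x 25)

def pvCh (e f g : Int) : Int :=
  PySem.Int.band (PySem.Int.bxor (PySem.Int.band e f) (PySem.Int.band (Int.not e) g)) pvMASK
def pvMaj (a b c : Int) : Int :=
  PySem.Int.bxor (PySem.Int.bxor (PySem.Int.band a b) (PySem.Int.band a c)) (PySem.Int.band b c)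

def pvK : List Int :=
  [0x428a2f98,0x71374491,0xb5c0fbcf,0xe9b5dba5,0x3956c25b,0x59f111f1,0x923f82a4,0xab1c5ed5,
   0xd807aa98,0x12835b01,0x243185be,0x550c7dc3,0x72be5d74,0x80deb1fe,0x9bdc06a7,0xc19bf174,
   0xe49b69c1,0xefbe4786,0x0fc19dc6,0x240ca1cc,0x2de92c6f,0x4a7484aa,0x5cb0a9dc,0x76f988da,
   0x983e5152,0xa831c66d,0xb00327c8,0xbf597fc7,0xc6e00bf3,0xd5a79147,0x06ca6351,0x14292967,
   0x27b70a85,0x2e1b2138,0x4d2c6dfc,0x53380d13,0x650a7354,0x766a0abb,0x81c2c92e,0x92722c85,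
   0xa2bfe8a1,0xa81a664b,0xc24b8b70,0xc76c51a3,0xd192e819,0xd6990624,0xf40e3585,0x106aa070,
   0x19a4c116,0x1e376c08,0x2748774c,0x34b0bcb5,0x391c0cb3,0x4ed8aa4a,0x5b9cca4f,0x682e6ff3,
   0x748f82ee,0x78a5636f,0x84c87814,0x8cc70208,0x90befffa,0xa4506ceb,0xbef9a3f7,0xc67178f2]

abbrev ShaSt := Int × Int × Int × Int × Int × Int × Int × Int

def stList (st : ShaSt) : List Int :=
  [st.1, st.2.1, st.2.2.1, st.2.2.2.1, st.2.2.2.2.1, st.2.2.2.2.2.1, st.2.2.2.2.2.2.1, st.2.2.2.2.2.2.2]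

def pvIVst : ShaSt := (0x6a09e667,0xbb67ae85,0x3c6ef372,0xa54ff53a,0x510e527f,0x9b05688c,0x1f83d9ab,0x5be0cd19)

-- A's schedule: preallocate 64 slots, assign W[i] in place
def schedStepA (W : List Int) (i : Int) : List Int :=
  W.set i.toNat (PySem.Int.band
    (sig1 (PySem.List.pyGetD W (i-2) 0) + PySem.List.pyGetD W (i-7) 0 +
     sig0 (PySem.List.pyGetD W (i-15) 0) + PySem.List.pyGetD W (i-16) 0) pvMASK)

def make_schedule (W16 : List Int) : List Int :=
  (PySem.List.pyRange 16 64).foldl schedStepA (W16 ++ List.replicate 48 0)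

-- A's rounds: index into K and W by the round counter, accumulate all states
def shaStep (W : List Int) (st : ShaSt) (r : Int) : ShaSt :=
  let (a,b,c,d,e,f,g,_h) := st
  let T1 := PySem.Int.band (_h + bigSig1 e + pvCh e f g + PySem.List.pyGetD pvK r 0 + PySem.List.pyGetD W r 0) pvMASK
  let T2 := PySem.Int.band (bigSig0 a + pvMaj a b c) pvMASK
  (PySem.Int.band (T1 + T2) pvMASK, a, b, c, PySem.Int.band (d + T1) pvMASK, e, f, g)

def shaBody (W : List Int) (p : ShaSt × List (List Int)) (r : Int) : ShaSt × List (List Int) :=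
  let st := shaStep W p.1 r
  (st, p.2 ++ [stList st])

def sha_rounds (W : List Int) (R : Int) : List (List Int) :=
  ((PySem.List.pyRange 0 R).foldl (shaBody W) (pvIVst, [stList pvIVst])).2

-- the comprehension [(Wn[i]+DWs[i])&MASK for i in range(16)]
def faulty (Wn DWs : List Int) : List Int :=
  (PySem.List.pyRange 0 16).map (fun i =>
    PySem.Int.band (PySem.List.pyGetD Wn i 0 + PySem.List.pyGetD DWs i 0) pvMASK)

-- A's loop body (i=3..15 cascade step): rebuild Wfc, recompute BOTH sides to depth dt
def wangStepA (Wn : List Int) (DWs : List Int) (step : Int) : List Int :=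
  let wi := step + 3
  let dt := step + 4
  let Wfc := faulty Wn DWs
  let sn := sha_rounds (make_schedule Wn) dt
  let sf := sha_rounds (make_schedule Wfc) dt
  DWs.set wi.toNat (PySem.Int.band
    (-(PySem.List.pyGetD (PySem.List.pyGetD sf dt []) 4 0 -
       PySem.List.pyGetD (PySem.List.pyGetD sn dt []) 4 0)) pvMASK)

def wang_cascade (W0 : Int) (W1 : Int) (DW0 : Int) : List Int × List (List Int) × List (List Int) :=
  let Wn : List Int := [W0, W1] ++ List.replicate 14 0
  let DWs : List Int := (List.replicate 16 (0:Int)).set 0 DW0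
  -- i=2 → De3=0 (peeled step)
  let Wft := faulty Wn DWs
  let sn3 := sha_rounds (make_schedule Wn) 3
  let sf3 := sha_rounds (make_schedule Wft) 3
  let DWs := DWs.set 2 (PySem.Int.band
    (-(PySem.List.pyGetD (PySem.List.pyGetD sf3 3 []) 4 0 -
       PySem.List.pyGetD (PySem.List.pyGetD sn3 3 []) 4 0)) pvMASK)
  -- i=3..15 → De4..De16=0
  let DWs := (PySem.List.pyRange 0 13).foldl (wangStepA Wn) DWs
  let Wf := faulty Wn DWs
  let sn := sha_rounds (make_schedule Wn) 20
  let sf := sha_rounds (make_schedule Wf) 20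
  (DWs, sn, sf)

-- ===== PORT B =====
-- B's schedule: grow by appending
def schedStepB (W : List Int) (i : Int) : List Int :=
  W ++ [PySem.Int.band
    (sig1 (PySem.List.pyGetD W (i-2) 0) + PySem.List.pyGetD W (i-7) 0 +
     sig0 (PySem.List.pyGetD W (i-15) 0) + PySem.List.pyGetD W (i-16) 0) pvMASK]

def scheduleB (W16 : List Int) : List Int :=
  (PySem.List.pyRange 16 64).foldl schedStepB W16

-- one SHA-256 round as a pure function on the 8-tuple (w and k passed in, no indexing)
def compress (st : ShaSt) (w k : Int) : ShaSt :=
  let (a,b,c,d,e,f,g,h) := st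
  let T1 := PySem.Int.band (h + bigSig1 e + pvCh e f g + k + w) pvMASK
  let T2 := PySem.Int.band (bigSig0 a + pvMaj a b c) pvMASK
  (PySem.Int.band (T1 + T2) pvMASK, a, b, c, PySem.Int.band (d + T1) pvMASK, e, f, g)

-- all intermediate states, driven by zip(W[:R], K)
def traceStep (p : ShaSt × List (List Int)) (wk : Int × Int) : ShaSt × List (List Int) :=
  let st := compress p.1 wk.1 wk.2
  (st, p.2 ++ [stList st])

def trace (W : List Int) (R : Int) : List (List Int) :=
  (((PySem.List.slice W none (some R)).zip pvK).foldl traceStep (pvIVst, [stList pvIVst])).2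

-- only the e register after R rounds (st[4]; no state list built)
def e_after (W : List Int) (R : Int) : Int :=
  (((PySem.List.slice W none (some R)).zip pvK).foldl (fun st wk => compress st wk.1 wk.2) pvIVst).2.2.2.2.1

-- B's cascade step: read the hoisted natural trace, track only the faulty e, patch Wf in place
def wangStepB (Wn : List Int) (sn : List (List Int)) (p : List Int × List Int) (wi : Int) :
    List Int × List Int :=
  let dt := wi + 1
  let d := PySem.Int.band
    (PySem.List.pyGetD (PySem.List.pyGetD sn dt []) 4 0 - e_after (scheduleB p.2) dt) pvMASK
  (p.1.set wi.toNat d, p.2.set wi.toNat (PySem.Int.band (PySem.List.pyGetD Wn wi 0 + d) pvMASK))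

def wang_cascade_alt (W0 : Int) (W1 : Int) (DW0 : Int) : List Int × List (List Int) × List (List Int) :=
  let Wn : List Int := [W0, W1] ++ List.replicate 14 0
  let DWs : List Int := DW0 :: List.replicate 15 0
  let sn := trace (scheduleB Wn) 20
  let Wf := (Wn.zip DWs).map (fun p => PySem.Int.band (p.1 + p.2) pvMASK)
  let q := (PySem.List.pyRange 2 16).foldl (wangStepB Wn sn) (DWs, Wf)
  (q.1, sn, trace (scheduleB q.2) 20)

-- ===== PRECONDITION & SPEC =====
def Spec_wang_cascade (W0 : Int) (W1 : Int) (DW0 : Int) (out : List Int × List (List Int) × List (List Int)) : Prop := out = wang_cascade_alt W0 W1 DW0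
instance (W0 : Int) (W1 : Int) (DW0 : Int) (out : List Int × List (List Int) × List (List Int)) : Decidable (Spec_wang_cascade W0 W1 DW0 out) := by unfold Spec_wang_cascade; infer_instance

-- ===== CLAIM (what is proved, stated in full; the proofs are below) =====
def Claim_equal_wang_cascade : Prop := ∀ (W0 : Int) (W1 : Int) (DW0 : Int), Dom_wang_cascade W0 W1 DW0 → Spec_wang_cascade W0 W1 DW0 (wang_cascade W0 W1 DW0)

-- ===== LEMMAS AND PROOFS =====

-- the round-state after n rounds (the n-fold iteration of shaStep from the IV)
def stIter (W : List Int) : Nat → ShaSt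
  | 0 => pvIVst
  | n+1 => shaStep W (stIter W n) (n : Int)

-- A's fold characterized by stIter
theorem shaFold_eq (W : List Int) (m : Nat) :
    (PySem.List.pyRange 0 (m : Int)).foldl (shaBody W) (pvIVst, [stList pvIVst])
      = (stIter W m, (List.range (m+1)).map (fun k => stList (stIter W k))) := by
  induction m with
  | zero =>
    rw [Nat.cast_zero, show PySem.List.pyRange 0 0 = [] from by decide]
    simp [stIter]
  | succ n ih =>
    have h1 : ((n+1 : Nat) : Int) = (n : Int) + 1 := by push_cast; ring
    rw [h1, PySem.List.pyRange_one_succ_right (by positivity), List.foldl_append, ih]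
    simp [shaBody, List.range_succ, stIter]

theorem sha_rounds_getD (W : List Int) (m dt : Nat) (h : dt ≤ m) :
    PySem.List.pyGetD (sha_rounds W (m : Int)) (dt : Int) [] = stList (stIter W dt) := by
  unfold sha_rounds
  rw [shaFold_eq, PySem.List.pyGetD_natCast]
  exact PySem.List.getD_map_range _ _ _ _ (by omega)

-- B's zip(W[:R], K) is the list of (W[r], K[r]) pairs
theorem zip_slice_eq (W : List Int) (R : Nat) (hW : R ≤ W.length) (h64 : R ≤ 64) :
    (PySem.List.slice W none (some (R:Int))).zip pvK
      = (List.range R).map (fun r => (W.getD r 0, pvK.getD r 0)) := by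
  have hK : pvK.length = 64 := by decide
  rw [PySem.List.slice_to_natCast]
  apply List.ext_getElem
  · simp [hK]; omega
  · intro i h1 h2
    have hi : i < R := by simpa using h2
    rw [List.getElem_zip, List.getElem_map, List.getElem_range,
        List.getElem_take, List.getD_eq_getElem _ _ (by omega),
        List.getD_eq_getElem _ _ (by omega)]

-- B's one-round function is A's step at that index
theorem compress_eq_shaStep (W : List Int) (st : ShaSt) (n : Nat) :
    compress st (W.getD n 0) (pvK.getD n 0) = shaStep W st (n : Int) := by
  simp [compress, shaStep, PySem.List.pyGetD_natCast]

-- B's trace fold characterized by stIter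
theorem traceFold_eq (W : List Int) (R : Nat) :
    (List.range R).foldl (fun p r => traceStep p (W.getD r 0, pvK.getD r 0)) (pvIVst, [stList pvIVst])
      = (stIter W R, (List.range (R+1)).map (fun k => stList (stIter W k))) := by
  induction R with
  | zero => simp [stIter]
  | succ n ih =>
    rw [List.range_succ, List.foldl_append, ih]
    simp only [List.foldl_cons, List.foldl_nil, traceStep]
    rw [compress_eq_shaStep]
    simp [List.range_succ, stIter]

theorem trace_eq (W : List Int) (R : Nat) (hW : R ≤ W.length) (h64 : R ≤ 64) :
    trace W (R : Int) = (List.range (R+1)).map (fun k => stList (stIter W k)) := by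
  unfold trace
  rw [zip_slice_eq W R hW h64, List.foldl_map, traceFold_eq]

theorem eFold_eq (W : List Int) (R : Nat) :
    (List.range R).foldl (fun st r => compress st (W.getD r 0) (pvK.getD r 0)) pvIVst
      = stIter W R := by
  induction R with
  | zero => simp [stIter]
  | succ n ih =>
    rw [List.range_succ, List.foldl_append, ih]
    simp only [List.foldl_cons, List.foldl_nil]
    rw [compress_eq_shaStep]
    rfl

theorem e_after_eq (W : List Int) (R : Nat) (hW : R ≤ W.length) (h64 : R ≤ 64) :
    e_after W (R : Int) = (stIter W R).2.2.2.2.1 := by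
  unfold e_after
  rw [zip_slice_eq W R hW h64, List.foldl_map, eFold_eq]

-- st[4] of a state list
theorem stList_four (st : ShaSt) : PySem.List.pyGetD (stList st) 4 0 = st.2.2.2.2.1 := rfl

-- append-built schedule = preallocate-and-assign schedule (invariant over the first n steps)
theorem sched_inv (W16 : List Int) (hl : W16.length = 16) (n : Nat) (hn : n ≤ 48) :
    ((PySem.List.pyRange 16 (16 + (n:Int))).foldl schedStepB W16).length = 16 + n ∧
    (PySem.List.pyRange 16 (16 + (n:Int))).foldl schedStepA (W16 ++ List.replicate 48 0)
      = (PySem.List.pyRange 16 (16 + (n:Int))).foldl schedStepB W16 ++ List.replicate (48 - n) 0 := by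
  induction n with
  | zero =>
    rw [Nat.cast_zero, add_zero, show PySem.List.pyRange 16 16 = [] from by decide]
    simp [hl]
  | succ n ih =>
    obtain ⟨ihl, ihe⟩ := ih (by omega)
    have h1 : (16 : Int) + ((n+1 : Nat) : Int) = (16 + (n:Int)) + 1 := by omega
    rw [h1, PySem.List.pyRange_one_succ_right (by omega), List.foldl_append, List.foldl_append,
        ihe]
    simp only [List.foldl_cons, List.foldl_nil]
    set B := (PySem.List.pyRange 16 (16 + (n:Int))).foldl schedStepB W16 with hB
    have hget : ∀ k : Nat, k < 16 + n →
        PySem.List.pyGetD (B ++ List.replicate (48 - n) 0) ((k:Nat):Int) 0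
          = PySem.List.pyGetD B ((k:Nat):Int) 0 := by
      intro k hk
      rw [PySem.List.pyGetD_natCast, PySem.List.pyGetD_natCast,
          List.getD_append _ _ _ _ (by omega)]
    have hc2 : (16 + (n:Int)) - 2 = ((14 + n : Nat) : Int) := by push_cast; ring
    have hc7 : (16 + (n:Int)) - 7 = ((9 + n : Nat) : Int) := by push_cast; ring
    have hc15 : (16 + (n:Int)) - 15 = ((1 + n : Nat) : Int) := by push_cast; ring
    have hc16 : (16 + (n:Int)) - 16 = ((n : Nat) : Int) := by omega
    have htn : (16 + (n:Int)).toNat = 16 + n := by omega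
    have hrep : List.replicate (48 - n) (0:Int) = 0 :: List.replicate (48 - (n+1)) 0 := by
      rw [show 48 - n = (48 - (n+1)) + 1 from by omega, List.replicate_succ]
    constructor
    · simp [schedStepB, ihl]; omega
    · simp only [schedStepA, schedStepB, hc2, hc7, hc15, hc16,
        hget _ (by omega : 14 + n < 16 + n), hget _ (by omega : 9 + n < 16 + n),
        hget _ (by omega : 1 + n < 16 + n), hget _ (by omega : n < 16 + n), htn]
      rw [hrep, show 16 + n = B.length from by omega]
      simp

theorem scheduleB_eq (W16 : List Int) (hl : W16.length = 16) :
    make_schedule W16 = scheduleB W16 := by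
  have h := (sched_inv W16 hl 48 le_rfl).2
  rw [show (16:Int) + ((48:Nat):Int) = 64 from by norm_num] at h
  simpa [make_schedule, scheduleB] using h

theorem scheduleB_length (W16 : List Int) (hl : W16.length = 16) :
    (scheduleB W16).length = 64 := by
  have h := (sched_inv W16 hl 48 le_rfl).1
  rw [show (16:Int) + ((48:Nat):Int) = 64 from by norm_num] at h
  simpa [scheduleB] using h

theorem faulty_length (Wn DWs : List Int) : (faulty Wn DWs).length = 16 := by
  simp [faulty]

theorem faulty_set (Wn DWs : List Int) (hl : DWs.length = 16) (j : Nat) (_hj : j < 16) (d : Int) :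
    faulty Wn (DWs.set j d)
      = (faulty Wn DWs).set j (PySem.Int.band (PySem.List.pyGetD Wn (j : Int) 0 + d) pvMASK) := by
  have h16 : (16 : Int) = ((16 : Nat) : Int) := by simp
  unfold faulty
  rw [h16, PySem.List.pyRange_zero_natCast, List.map_map, List.map_map]
  apply List.ext_getElem
  · simp
  · intro k hk1 hk2
    have hk : k < 16 := by simpa using hk1
    have hks : k < (DWs.set j d).length := by simp [hl]; omega
    have hkd : k < DWs.length := by omega
    simp only [List.getElem_set, List.getElem_map, List.getElem_range, Function.comp,
               PySem.List.pyGetD_natCast]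
    rw [List.getD_eq_getElem _ _ hks, List.getElem_set, List.getD_eq_getElem _ _ hkd]
    split_ifs with hjk
    · subst hjk; rfl
    · rfl

theorem wangStepA_length (Wn DWs : List Int) (s : Int) :
    (wangStepA Wn DWs s).length = DWs.length := by
  simp [wangStepA]

theorem foldl_wangStepA_length (Wn : List Int) (l : List Int) (DWs : List Int) :
    (l.foldl (wangStepA Wn) DWs).length = DWs.length := by
  induction l generalizing DWs with
  | nil => rfl
  | cons x xs ih => rw [List.foldl_cons, ih, wangStepA_length]

-- the e register after dt rounds of the faulty schedule, as both sides compute it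
theorem e_both (Wn DWs : List Int) (dt : Nat) (hdt : dt ≤ 20) :
    e_after (scheduleB (faulty Wn DWs)) ((dt:Nat):Int)
      = PySem.List.pyGetD
          (PySem.List.pyGetD (sha_rounds (make_schedule (faulty Wn DWs)) ((dt:Nat):Int)) ((dt:Nat):Int) []) 4 0 := by
  have hfl := faulty_length Wn DWs
  have hsl : (scheduleB (faulty Wn DWs)).length = 64 := scheduleB_length _ hfl
  rw [sha_rounds_getD _ dt dt le_rfl, stList_four,
      e_after_eq _ dt (by omega) (by omega), scheduleB_eq _ hfl]

-- the natural trace sliced at dt is A's sn[dt]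
theorem sn_slice (Wn : List Int) (hl : Wn.length = 16) (dt : Nat) (hdt : dt ≤ 20) :
    PySem.List.pyGetD (trace (scheduleB Wn) 20) ((dt:Nat):Int) []
      = PySem.List.pyGetD (sha_rounds (make_schedule Wn) ((dt:Nat):Int)) ((dt:Nat):Int) [] := by
  rw [sha_rounds_getD _ dt dt le_rfl,
      show (20:Int) = ((20:Nat):Int) from by norm_num,
      trace_eq _ 20 (by rw [scheduleB_length _ hl]; omega) (by omega),
      ← scheduleB_eq _ hl, PySem.List.pyGetD_natCast,
      PySem.List.getD_map_range _ _ _ _ (by omega)]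

-- one cascade step: B's step from (DWs, faulty Wn DWs) matches A's step
theorem step_corr (Wn : List Int) (hWn : Wn.length = 16) (DWs : List Int) (hl : DWs.length = 16)
    (n : Nat) (hn : n ≤ 12) :
    wangStepB Wn (trace (scheduleB Wn) 20) (DWs, faulty Wn DWs) (3 + (n : Int))
      = (wangStepA Wn DWs (n : Int), faulty Wn (wangStepA Wn DWs (n : Int))) := by
  have hdtB : (3 + (n : Int)) + 1 = ((n+4 : Nat) : Int) := by push_cast; ring
  have hdtA : (n : Int) + 4 = ((n+4 : Nat) : Int) := by push_cast; ring
  have htB : (3 + (n : Int)).toNat = n + 3 := by omega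
  have htA : ((n : Int) + 3).toNat = n + 3 := by omega
  have hWnj : (3 + (n : Int)) = ((n + 3 : Nat) : Int) := by push_cast; ring
  simp only [wangStepA, wangStepB]
  rw [hdtB, hdtA, htB, htA,
      e_both Wn DWs (n+4) (by omega),
      sn_slice Wn hWn (n+4) (by omega), hWnj,
      faulty_set Wn DWs hl (n+3) (by omega), neg_sub]

-- correspondence between A's loop over range(13) and B's loop over range(3,16)
theorem loops_corr (Wn : List Int) (hWn : Wn.length = 16) (n : Nat) (hn : n ≤ 13)
    (DWs : List Int) (hl : DWs.length = 16) :
    (PySem.List.pyRange 3 (3 + (n : Int))).foldl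
        (wangStepB Wn (trace (scheduleB Wn) 20)) (DWs, faulty Wn DWs)
      = ((PySem.List.pyRange 0 (n : Int)).foldl (wangStepA Wn) DWs,
         faulty Wn ((PySem.List.pyRange 0 (n : Int)).foldl (wangStepA Wn) DWs)) := by
  induction n with
  | zero =>
    rw [Nat.cast_zero, add_zero, show PySem.List.pyRange 3 3 = [] from by decide,
        show PySem.List.pyRange 0 0 = [] from by decide]
    simp only [List.foldl_nil]
  | succ n ih =>
    have hn' : n ≤ 13 := by omega
    have h1 : ((n+1 : Nat) : Int) = (n : Int) + 1 := by push_cast; ring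
    have h2 : (3 : Int) + ((n : Int) + 1) = (3 + (n : Int)) + 1 := by ring
    rw [h1, h2,
        PySem.List.pyRange_one_succ_right (by omega : (3:Int) ≤ 3 + (n:Int)),
        PySem.List.pyRange_one_succ_right (by positivity : (0:Int) ≤ (n:Int)),
        List.foldl_append, List.foldl_append, ih hn']
    simp only [List.foldl_cons, List.foldl_nil]
    exact step_corr Wn hWn _ (by rw [foldl_wangStepA_length]; exact hl) n (by omega)

-- the hoisted/final 20-round traces agree
theorem trace20 (W : List Int) (h : W.length = 16) :
    sha_rounds (make_schedule W) 20 = trace (scheduleB W) 20 := by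
  have hsl := scheduleB_length W h
  rw [show (20:Int) = ((20:Nat):Int) from by norm_num,
      trace_eq _ 20 (by omega) (by omega), ← scheduleB_eq _ h]
  unfold sha_rounds
  rw [shaFold_eq]

-- ===== VERDICT (by name: the statement is the Claim_ definition above) =====
theorem wang_cascade_spec : Claim_equal_wang_cascade := by
  unfold Claim_equal_wang_cascade
  intro W0 W1 DW0 _
  unfold Spec_wang_cascade
  simp only [wang_cascade, wang_cascade_alt]
  set Wn : List Int := [W0, W1] ++ List.replicate 14 0 with hWn
  have hWnl : Wn.length = 16 := by rw [hWn]; simp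
  have hD0 : (List.replicate 16 (0:Int)).set 0 DW0 = DW0 :: List.replicate 15 0 := rfl
  set DWs0 : List Int := DW0 :: List.replicate 15 0 with hDW
  have hl0 : DWs0.length = 16 := by rw [hDW]; simp
  have hWf0 : (Wn.zip DWs0).map (fun p => PySem.Int.band (p.1 + p.2) pvMASK)
      = faulty Wn DWs0 := by
    rw [hWn, hDW]; rfl
  have hcons : PySem.List.pyRange 2 16 = 2 :: PySem.List.pyRange 3 16 := by decide
  have hfirst :
      wangStepB Wn (trace (scheduleB Wn) 20) (DWs0, faulty Wn DWs0) 2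
        = (DWs0.set 2 (PySem.Int.band
            (-(PySem.List.pyGetD (PySem.List.pyGetD (sha_rounds (make_schedule (faulty Wn DWs0)) 3) 3 []) 4 0 -
               PySem.List.pyGetD (PySem.List.pyGetD (sha_rounds (make_schedule Wn) 3) 3 []) 4 0)) pvMASK),
           faulty Wn (DWs0.set 2 (PySem.Int.band
            (-(PySem.List.pyGetD (PySem.List.pyGetD (sha_rounds (make_schedule (faulty Wn DWs0)) 3) 3 []) 4 0 -
               PySem.List.pyGetD (PySem.List.pyGetD (sha_rounds (make_schedule Wn) 3) 3 []) 4 0)) pvMASK))) := by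
    simp only [wangStepB]
    rw [show (2:Int) + 1 = ((3 : Nat) : Int) from by norm_num,
        e_both Wn DWs0 3 (by omega),
        sn_slice Wn hWnl 3 (by omega),
        show (2:Int) = ((2 : Nat) : Int) from by norm_num,
        faulty_set Wn DWs0 hl0 2 (by omega), neg_sub]
    norm_num
    exact ⟨rfl, rfl⟩
  rw [hD0, hWf0, hcons]
  simp only [List.foldl_cons]
  rw [hfirst,
      show (16:Int) = 3 + ((13 : Nat) : Int) from by norm_num,
      show (13:Int) = ((13 : Nat) : Int) from by norm_num,
      loops_corr Wn hWnl 13 le_rfl _ (by simp [hl0]),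
      trace20 Wn hWnl, trace20 _ (faulty_length _ _)]
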